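-- pv_equiv track=rewrite | github.com/afriedman412/rcg_full | rcg_new/rcg_app/rcg_func_dj.py | pnoun_test
-- ===== SOURCE A (Python) =====
-- def pnoun_test(t):
-- 	m_count = 0
-- 	f_count = 0
-- 	m = ['he', 'him', 'his', 'himself']
-- 	f = ['she', 'her', 'hers', 'herself']
-- 	for w in t.split():
-- 		if w in m:
-- 			m_count += 1
-- 		if w in f:
-- 			f_count += 1
-- 	return([m_count, f_count])
-- ===== SOURCE B (Python) =====
-- def pnoun_test(t):
--     counts = {}
--     for w in t.split():
--         counts[w] = counts.get(w, 0) + 1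
--     m_count = counts.get('he', 0) + counts.get('him', 0) + counts.get('his', 0) + counts.get('himself', 0)
--     f_count = counts.get('she', 0) + counts.get('her', 0) + counts.get('hers', 0) + counts.get('herself', 0)
--     return [m_count, f_count]
-- ===== Notes on version B (the rewrite author's own statement) =====
-- stated objective: idiomatic
-- what changed: B builds a frequency table of the tokens in one pass and then looks up the eight fixed pronouns, instead of testing every token for membership in the two pronoun lists.
import Mathlib
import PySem

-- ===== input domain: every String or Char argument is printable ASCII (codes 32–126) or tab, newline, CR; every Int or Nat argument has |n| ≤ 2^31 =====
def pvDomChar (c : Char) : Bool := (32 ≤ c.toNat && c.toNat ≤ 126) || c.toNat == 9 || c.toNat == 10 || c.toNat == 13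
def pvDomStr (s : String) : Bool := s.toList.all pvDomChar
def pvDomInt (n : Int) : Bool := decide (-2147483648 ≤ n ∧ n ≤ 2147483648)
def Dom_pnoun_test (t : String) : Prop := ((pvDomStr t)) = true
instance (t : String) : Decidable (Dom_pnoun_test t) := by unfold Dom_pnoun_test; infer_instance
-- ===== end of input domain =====

-- B replaces A's per-token membership tests by a one-pass frequency table followed by
-- eight fixed-key lookups (idiomatic counting style); same results on every input.

-- ===== PORT A =====
-- literal port of A: scan the words once, testing each against the two pronoun lists
def pnoun_test (t : String) : List Int :=
  let m : List String := ["he", "him", "his", "himself"]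
  let f : List String := ["she", "her", "hers", "herself"]
  let p : Int × Int :=
    (PySem.Str.split₀ t).foldl
      (fun (p : Int × Int) w =>
        (p.1 + (if m.contains w then 1 else 0),
         p.2 + (if f.contains w then 1 else 0)))
      (0, 0)
  [p.1, p.2]

-- ===== PORT B =====
-- literal port of B: build counts = {} with counts[w] = counts.get(w,0)+1, then sum lookups
def pnoun_test_alt (t : String) : List Int :=
  let counts : PySem.Dict String Int :=
    (PySem.Str.split₀ t).foldl
      (fun (d : PySem.Dict String Int) w => d.insert w (d.getD w 0 + 1))
      PySem.Dict.empty
  let m_count : Int :=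
    counts.getD "he" 0 + counts.getD "him" 0 + counts.getD "his" 0 + counts.getD "himself" 0
  let f_count : Int :=
    counts.getD "she" 0 + counts.getD "her" 0 + counts.getD "hers" 0 + counts.getD "herself" 0
  [m_count, f_count]

-- ===== PRECONDITION & SPEC =====
def Spec_pnoun_test (t : String) (out : List Int) : Prop := out = pnoun_test_alt t
instance (t : String) (out : List Int) : Decidable (Spec_pnoun_test t out) := by unfold Spec_pnoun_test; infer_instance

-- ===== CLAIM (what is proved, stated in full; the proofs are below) =====
def Claim_equal_pnoun_test : Prop := ∀ (t : String), Dom_pnoun_test t → Spec_pnoun_test t (pnoun_test t)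

-- ===== LEMMAS AND PROOFS =====

-- a membership test against a 4-element list of distinct literals splits into four equality tests
set_option maxRecDepth 8192 in
theorem pv_ite_contains4 (a b c d w : String) (hab : a ≠ b) (hac : a ≠ c) (had : a ≠ d)
    (hbc : b ≠ c) (hbd : b ≠ d) (hcd : c ≠ d) :
    (if ([a, b, c, d] : List String).contains w then (1 : Int) else 0)
      = (if w = a then 1 else 0) + (if w = b then 1 else 0)
        + (if w = c then 1 else 0) + (if w = d then 1 else 0) := by
  simp only [List.contains_cons, List.contains_nil, Bool.or_false]
  by_cases h1 : w = a <;> by_cases h2 : w = b <;> by_cases h3 : w = c <;> by_cases h4 : w = d <;>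
    simp_all

-- A's fold over the word list counts, for each side, the occurrences of the four pronouns
theorem pv_fold_eq (ws : List String) (a b : Int) :
    ws.foldl
      (fun (p : Int × Int) w =>
        (p.1 + (if (["he", "him", "his", "himself"] : List String).contains w then 1 else 0),
         p.2 + (if (["she", "her", "hers", "herself"] : List String).contains w then 1 else 0)))
      (a, b)
    = (a + ((ws.count "he" : Int) + ws.count "him" + ws.count "his" + ws.count "himself"),
       b + ((ws.count "she" : Int) + ws.count "her" + ws.count "hers" + ws.count "herself")) := by
  induction ws generalizing a b with
  | nil => simp
  | cons w ws ih =>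
    simp only [List.foldl_cons, ih, List.count_cons]
    rw [pv_ite_contains4 "he" "him" "his" "himself" w (by decide) (by decide) (by decide)
          (by decide) (by decide) (by decide),
        pv_ite_contains4 "she" "her" "hers" "herself" w (by decide) (by decide) (by decide)
          (by decide) (by decide) (by decide)]
    have hc : ∀ (v : String), ((ws.count v + if w == v then 1 else 0 : Nat) : Int)
        = (ws.count v : Int) + (if w = v then 1 else 0) := by
      intro v
      by_cases h : w = v <;> simp [h]
    simp only [hc, Prod.mk.injEq]
    constructor <;> ring

-- ===== VERDICT (by name: the statement is the Claim_ definition above) =====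
theorem pnoun_test_spec : Claim_equal_pnoun_test := by
  intro t _
  unfold Spec_pnoun_test pnoun_test pnoun_test_alt
  simp only [PySem.Dict.foldl_insert_getD_add_one_eq_counter, PySem.Dict.getD_counter]
  rw [pv_fold_eq]
  simp [add_assoc]
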